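-- pv_equiv track=rewrite | github.com/Lankesh-M/DSA-using-Java | JavaTraining/palindromeSeries.py | nth_palindrome
-- ===== SOURCE A (Python) =====
-- def is_palindrome(num):
--     # Convert number to string and check if it's equal to its reverse
--     return str(num) == str(num)[::-1]
--
-- def nth_palindrome(n):
--     if n == 1:
--         return 3
--     elif n == 2:
--         return 7
--
--     count = 2  # Already handled the first two palindromes (3, 7)
--     num = 33   # Starting with the next palindrome
--
--     while True:
--         if is_palindrome(num) and all(digit in '37' for digit in str(num)):
--             count += 1
--             if count == n:
--                 return num
--         num += 4  # Increment by 4 to get to the next potential palindrome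
-- ===== SOURCE B (Python) =====
-- def nth_palindrome(n):
--     # Generate the n-th palindrome over digits {3, 7} directly: palindromes of a
--     # given length L, in increasing order, correspond to the ceil(L/2)-bit binary
--     # numbers 0..2^h-1 (bit 0 -> digit 3, bit 1 -> digit 7) used as the left half.
--     L, bits = 1, 0
--     for _ in range(n - 1):
--         h = (L + 1) // 2
--         if bits + 1 < (1 << h):
--             bits += 1
--         else:
--             L, bits = L + 1, 0
--     h = (L + 1) // 2
--     half = [3 + 4 * ((bits >> (h - 1 - i)) & 1) for i in range(h)]
--     digits = half + half[:L // 2][::-1]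
--     num = 0
--     for d in digits:
--         num = 10 * num + d
--     return num
-- ===== Notes on version B (the rewrite author's own statement) =====
-- stated objective: faster
-- what changed: Instead of scanning every 4th integer and string-testing each candidate, B constructs the n-th palindrome directly: it steps a (length, binary-half) counter n-1 times and mirrors the half into digits, so no candidate testing or string conversion happens at all. Pre_ excludes non-positive n, where A loops forever (its counter can never reach n).
import Mathlib
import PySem

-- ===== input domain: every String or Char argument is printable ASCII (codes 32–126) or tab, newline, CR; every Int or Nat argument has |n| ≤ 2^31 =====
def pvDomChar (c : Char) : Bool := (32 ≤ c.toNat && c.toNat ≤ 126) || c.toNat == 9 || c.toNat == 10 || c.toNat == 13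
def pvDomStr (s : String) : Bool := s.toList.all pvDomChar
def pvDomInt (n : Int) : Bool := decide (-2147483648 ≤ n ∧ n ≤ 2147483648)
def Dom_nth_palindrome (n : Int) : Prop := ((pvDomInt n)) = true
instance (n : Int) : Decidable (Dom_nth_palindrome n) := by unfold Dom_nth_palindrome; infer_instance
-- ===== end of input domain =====

-- B replaces A's scan over every 4th integer (string-testing each candidate) by directly
-- generating the n-th {3,7}-digit palindrome from a (length, binary-half) counter; faster.

-- ===== PORT A =====
def is_palindrome (num : Int) : Bool :=
  -- str(num) == str(num)[::-1]; step -1 is never 0, so slice? is always `some` (default unused)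
  PySem.Int.toStr num == (PySem.Str.slice? (PySem.Int.toStr num) none none (-1)).getD (PySem.Int.toStr num)

-- the `while True:` loop; the fuel argument only makes it total (proved sufficient for n ≥ 3)
def nthLoop (n : Int) : Nat → Int → Int → Int
  | 0, _, num => num
  | fuel+1, count, num =>
    if is_palindrome num && (PySem.Int.toChars num).all (fun d => PySem.Chars.isIn [d] ['3','7']) then
      if count + 1 = n then num else nthLoop n fuel (count + 1) (num + 4)
    else nthLoop n fuel count (num + 4)

def nth_palindrome (n : Int) : Int :=
  if n = 1 then 3
  else if n = 2 then 7
  else nthLoop n (10 ^ n.toNat) 2 33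

-- ===== PORT B =====
-- one step of the (L, bits) counter; h ≥ 0 always here, so `.toNat` on the shift is exact
def stepB (st : Int × Int) : Int × Int :=
  let h := PySem.Int.floordiv (st.1 + 1) 2
  if st.2 + 1 < (1 : Int) <<< h.toNat then (st.1, st.2 + 1) else (st.1 + 1, 0)

-- `for _ in range(n - 1)`
def iterB : Nat → Int × Int → Int × Int
  | 0, st => st
  | k+1, st => iterB k (stepB st)

def nth_palindrome_alt (n : Int) : Int :=
  let st := iterB (n - 1).toNat (1, 0)
  let h := PySem.Int.floordiv (st.1 + 1) 2
  -- [3 + 4 * ((bits >> (h - 1 - i)) & 1) for i in range(h)]; h - 1 - i ≥ 0 on range(h)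
  let half := (PySem.List.pyRange 0 h 1).map
    (fun i => 3 + 4 * PySem.Int.band (st.2 >>> (h - 1 - i).toNat) 1)
  -- half + half[:L // 2][::-1]; step -1, so slice? is always `some` (default unused)
  let digits := half ++
    ((PySem.List.slice? (PySem.List.slice half none (some (PySem.Int.floordiv st.1 2))) none none (-1)).getD [])
  digits.foldl (fun num d => 10 * num + d) 0

-- ===== PRECONDITION & SPEC =====
-- Pre_ excludes non-positive n: there A's `while True` loop never meets its return condition and diverges.
def Pre_nth_palindrome (n : Int) : Prop := 1 ≤ n
instance (n : Int) : Decidable (Pre_nth_palindrome n) := by unfold Pre_nth_palindrome; infer_instance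
def pvWitness_nth_palindrome : Int := 5

def Spec_nth_palindrome (n : Int) (out : Int) : Prop := out = nth_palindrome_alt n
instance (n : Int) (out : Int) : Decidable (Spec_nth_palindrome n out) := by
  unfold Spec_nth_palindrome; infer_instance

-- ===== CLAIM (what is proved, stated in full; the proofs are below) =====
def Claim_equal_nth_palindrome : Prop :=
  ∀ (n : Int), Dom_nth_palindrome n → Pre_nth_palindrome n →
    Spec_nth_palindrome n (nth_palindrome n)

-- ===== LEMMAS AND PROOFS =====

/- The abstract model both ports are reduced to: digit lists (most significant first). -/

/-- Value of a digit list, most significant digit first. -/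
def dval (ds : List Nat) : Nat := ds.foldl (fun a d => 10 * a + d) 0

/-- All digits are 3 or 7. -/
def GoodL (ds : List Nat) : Prop := ∀ d ∈ ds, d = 3 ∨ d = 7

/-- Digits (msd first) of the half encoded by the low `h` bits of `b`: bit 1 ↦ 7, bit 0 ↦ 3. -/
def halfN : Nat → Nat → List Nat
  | 0, _ => []
  | h+1, b => (3 + 4 * (b >>> h &&& 1)) :: halfN h b

def hOf (L : Nat) : Nat := (L + 1) / 2

/-- The {3,7}-palindrome of length `L` whose left half is encoded by `b`. -/
def palN (L b : Nat) : List Nat := halfN (hOf L) b ++ ((halfN (hOf L) b).take (L / 2)).reverse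

def stepN (s : Nat × Nat) : Nat × Nat :=
  if s.2 + 1 < 2 ^ hOf s.1 then (s.1, s.2 + 1) else (s.1 + 1, 0)

def stN : Nat → Nat × Nat
  | 0 => (1, 0)
  | k+1 => stepN (stN k)

/-- The (k+1)-st {3,7}-palindrome value, k = 0, 1, 2, …  -/
def W (k : Nat) : Nat := dval (palN (stN k).1 (stN k).2)

/-- Decimal digits of `n`, most significant first. -/
def nrepr (n : Nat) : List Nat :=
  if h : n < 10 then [n] else nrepr (n / 10) ++ [n % 10]
  decreasing_by exact Nat.div_lt_self (by omega) (by omega)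

-- ### value of digit lists
lemma dval_foldl_from (ds : List Nat) : ∀ a : Nat,
    ds.foldl (fun x d => 10 * x + d) a = a * 10 ^ ds.length + dval ds := by
  induction ds with
  | nil => intro a; simp [dval]
  | cons d t ih =>
    intro a
    simp only [List.foldl_cons, dval, List.length_cons] at *
    rw [ih (10 * a + d), ih (10 * 0 + d)]
    ring

lemma dval_append (xs ys : List Nat) :
    dval (xs ++ ys) = dval xs * 10 ^ ys.length + dval ys := by
  unfold dval
  rw [List.foldl_append, dval_foldl_from]
  rfl

lemma dval_cons (d : Nat) (t : List Nat) :
    dval (d :: t) = d * 10 ^ t.length + dval t := by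
  have := dval_append [d] t
  simpa [dval] using this

lemma dval_concat (xs : List Nat) (d : Nat) :
    dval (xs ++ [d]) = 10 * dval xs + d := by
  rw [dval_append]; simp [dval]; ring

lemma dval_lt_pow (ds : List Nat) (h : ∀ d ∈ ds, d < 10) :
    dval ds < 10 ^ ds.length := by
  induction ds with
  | nil => simp [dval]
  | cons d t ih =>
    rw [dval_cons]
    have hd : d < 10 := h d (by simp)
    have ht := ih (fun x hx => h x (by simp [hx]))
    have : d * 10 ^ t.length ≤ 9 * 10 ^ t.length := by
      exact Nat.mul_le_mul_right _ (by omega)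
    simp only [List.length_cons, pow_succ]
    omega

lemma le_dval (ds : List Nat) (hg : GoodL ds) (hne : ds ≠ []) :
    3 * 10 ^ (ds.length - 1) ≤ dval ds := by
  cases ds with
  | nil => exact absurd rfl hne
  | cons d t =>
    rw [dval_cons]
    have hd : d = 3 ∨ d = 7 := hg d (by simp)
    have : 3 * 10 ^ t.length ≤ d * 10 ^ t.length := Nat.mul_le_mul_right _ (by omega)
    simp only [List.length_cons, Nat.add_sub_cancel]
    omega

lemma dval_le_rep7 (ds : List Nat) (hg : GoodL ds) :
    dval ds ≤ dval (List.replicate ds.length 7) := by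
  induction ds with
  | nil => simp
  | cons d t ih =>
    rw [dval_cons, List.length_cons, List.replicate_succ, dval_cons]
    have hd : d = 3 ∨ d = 7 := hg d (by simp)
    have ht := ih (fun x hx => hg x (by simp [hx]))
    have h1 : d * 10 ^ t.length ≤ 7 * 10 ^ t.length := Nat.mul_le_mul_right _ (by omega)
    simp only [List.length_replicate]
    omega

lemma rep3_le_dval (ds : List Nat) (hg : GoodL ds) :
    dval (List.replicate ds.length 3) ≤ dval ds := by
  induction ds with
  | nil => simp
  | cons d t ih =>
    rw [dval_cons, List.length_cons, List.replicate_succ, dval_cons]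
    have hd : d = 3 ∨ d = 7 := hg d (by simp)
    have ht := ih (fun x hx => hg x (by simp [hx]))
    have h1 : 3 * 10 ^ t.length ≤ d * 10 ^ t.length := Nat.mul_le_mul_right _ (by omega)
    simp only [List.length_replicate]
    omega

lemma dval_mod4 (ds : List Nat) (hg : GoodL ds) (hl : 2 ≤ ds.length) :
    dval ds % 4 = 1 := by
  rcases List.eq_nil_or_concat ds with rfl | ⟨xs, b, rfl⟩
  · simp at hl
  rcases List.eq_nil_or_concat xs with rfl | ⟨ys, a, rfl⟩
  · simp at hl
  simp only [List.concat_eq_append] at *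
  rw [dval_concat, dval_concat]
  have ha : a = 3 ∨ a = 7 := hg a (by simp)
  have hb : b = 3 ∨ b = 7 := hg b (by simp)
  omega


lemma nrepr_lt (n : Nat) (h : n < 10) : nrepr n = [n] := by rw [nrepr]; simp [h]
lemma nrepr_ge (n : Nat) (h : ¬ n < 10) : nrepr n = nrepr (n / 10) ++ [n % 10] := by
  conv_lhs => rw [nrepr]
  simp [h]

lemma nrepr_ne_nil (n : Nat) : nrepr n ≠ [] := by
  by_cases h : n < 10
  · simp [nrepr_lt n h]
  · simp [nrepr_ge n h]

lemma nrepr_digits_lt (n : Nat) : ∀ d ∈ nrepr n, d < 10 := by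
  induction n using Nat.strong_induction_on with
  | _ n ih =>
    by_cases h : n < 10
    · simp [nrepr_lt n h, h]
    · rw [nrepr_ge n h]
      intro d hd
      rcases List.mem_append.mp hd with h1 | h1
      · exact ih (n / 10) (Nat.div_lt_self (by omega) (by omega)) d h1
      · simp at h1; omega

lemma dval_nrepr (n : Nat) : dval (nrepr n) = n := by
  induction n using Nat.strong_induction_on with
  | _ n ih =>
    by_cases h : n < 10
    · simp [nrepr_lt n h, dval]
    · rw [nrepr_ge n h, dval_concat, ih (n / 10) (Nat.div_lt_self (by omega) (by omega))]
      omega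

lemma nrepr_dval (ds : List Nat) (hg : GoodL ds) (hne : ds ≠ []) :
    nrepr (dval ds) = ds := by
  induction ds using List.reverseRecOn with
  | nil => exact absurd rfl hne
  | append_singleton xs d ih =>
    rw [dval_concat]
    have hd : d = 3 ∨ d = 7 := hg d (by simp)
    rcases List.eq_nil_or_concat xs with rfl | ⟨ys, a, rfl⟩
    · simp [dval]; rw [nrepr_lt d (by omega)]
    · simp only [List.concat_eq_append] at ih ⊢
      have hxg : GoodL (ys ++ [a]) := fun x hx => hg x (by simp [List.mem_append] at hx ⊢; tauto)
      have h3 : 3 * 10 ^ ((ys ++ [a]).length - 1) ≤ dval (ys ++ [a]) := le_dval _ hxg (by simp)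
      have hv3 : 3 ≤ dval (ys ++ [a]) := by
        have hpos : 0 < 10 ^ ((ys ++ [a]).length - 1) := pow_pos (by omega) _
        calc (3:Nat) ≤ 3 * 10 ^ ((ys ++ [a]).length - 1) := Nat.le_mul_of_pos_right 3 hpos
        _ ≤ dval (ys ++ [a]) := h3
      rw [nrepr_ge _ (by omega)]
      have hdiv : (10 * dval (ys ++ [a]) + d) / 10 = dval (ys ++ [a]) := by omega
      have hmod : (10 * dval (ys ++ [a]) + d) % 10 = d := by omega
      rw [hdiv, hmod, ih hxg (by simp)]

-- ### bridge from Python's str(num) to `nrepr`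
lemma toDigitsCore_eq (fuel n : Nat) (ds : List Char) (h : n < fuel) :
    Nat.toDigitsCore 10 fuel n ds = (nrepr n).map Nat.digitChar ++ ds := by
  induction fuel generalizing n ds with
  | zero => omega
  | succ fuel ih =>
    have hstep : Nat.toDigitsCore 10 (fuel+1) n ds =
        if n / 10 = 0 then Nat.digitChar (n % 10) :: ds
        else Nat.toDigitsCore 10 fuel (n / 10) (Nat.digitChar (n % 10) :: ds) := rfl
    rw [hstep]
    by_cases h10 : n / 10 = 0
    · rw [if_pos h10, nrepr_lt n (by omega)]
      simp [Nat.mod_eq_of_lt (show n < 10 by omega)]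
    · have hn10 : ¬ n < 10 := by omega
      rw [if_neg h10, ih (n / 10) _ (by omega), nrepr_ge n hn10]
      simp

lemma toDigits_eq (n : Nat) : Nat.toDigits 10 n = (nrepr n).map Nat.digitChar := by
  rw [Nat.toDigits, toDigitsCore_eq (n+1) n [] (by omega)]
  simp

-- injectivity of digitChar below 10
lemma digitChar_inj : ∀ a < 10, ∀ b < 10, Nat.digitChar a = Nat.digitChar b → a = b := by decide

lemma map_digitChar_inj (l1 l2 : List Nat) (h1 : ∀ d ∈ l1, d < 10) (h2 : ∀ d ∈ l2, d < 10)
    (h : l1.map Nat.digitChar = l2.map Nat.digitChar) : l1 = l2 := by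
  induction l1 generalizing l2 with
  | nil => cases l2 <;> simp_all
  | cons a t ih =>
    cases l2 with
    | nil => simp_all
    | cons b t2 =>
      simp only [List.map_cons, List.cons.injEq] at h
      have := digitChar_inj a (h1 a (by simp)) b (h2 b (by simp)) h.1
      rw [this, ih t2 (fun d hd => h1 d (by simp [hd])) (fun d hd => h2 d (by simp [hd])) h.2]

lemma isIn_digit : ∀ d < 10, (PySem.Chars.isIn [Nat.digitChar d] ['3','7'] = true ↔ (d = 3 ∨ d = 7)) := by decide

-- characterization of A's test
lemma testA_iff (m : Int) (hm : 0 < m) :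
    ((PySem.Int.toStr m == (PySem.Str.slice? (PySem.Int.toStr m) none none (-1)).getD (PySem.Int.toStr m)) &&
      (PySem.Int.toChars m).all (fun d => PySem.Chars.isIn [d] ['3','7'])) = true
    ↔ (GoodL (nrepr m.toNat) ∧ (nrepr m.toNat).reverse = nrepr m.toNat) := by
  have hchars : PySem.Int.toChars m = (nrepr m.toNat).map Nat.digitChar := by
    rw [PySem.Int.toChars, if_neg (by omega), toDigits_eq]
  rw [PySem.Str.slice?_none_none_neg_one]
  simp only [Option.getD_some, Bool.and_eq_true, beq_iff_eq, List.all_eq_true]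
  constructor
  · rintro ⟨hpal, hall⟩
    have hpal' : (PySem.Int.toStr m).toList = (PySem.Int.toStr m).toList.reverse := by
      conv_lhs => rw [hpal]
      rw [String.toList_ofList]
    rw [PySem.Int.toList_toStr, hchars] at hpal'
    have hrev : (nrepr m.toNat).reverse = nrepr m.toNat := by
      apply map_digitChar_inj _ _ (by intro d hd; exact nrepr_digits_lt _ d (List.mem_reverse.mp hd)) (nrepr_digits_lt _)
      rw [List.map_reverse]
      exact hpal'.symm
    refine ⟨?_, hrev⟩
    intro d hd
    have hd10 := nrepr_digits_lt m.toNat d hd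
    have := hall (Nat.digitChar d) (by rw [hchars]; exact List.mem_map_of_mem hd)
    exact (isIn_digit d hd10).mp this
  · rintro ⟨hg, hrev⟩
    constructor
    · rw [PySem.Int.toStr]
      congr 1
      rw [String.toList_ofList, hchars]
      conv_lhs => rw [← hrev]
      rw [List.map_reverse]
    · intro c hc
      rw [hchars] at hc
      rcases List.mem_map.mp hc with ⟨d, hd, rfl⟩
      exact (isIn_digit d (nrepr_digits_lt _ d hd)).mpr (hg d hd)

-- ## Lex machinery
lemma lexVal {ds es : List Nat} (hlex : List.Lex (· < ·) ds es) :
    ds.length = es.length → (∀ d ∈ ds, d < 10) → (∀ d ∈ es, d < 10) →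
    dval ds < dval es := by
  induction hlex with
  | nil => intro hlen _ _; simp at hlen
  | @rel a t1 b t2 hr =>
    intro hlen h1 h2
    rw [dval_cons, dval_cons]
    have hk : t1.length = t2.length := by simpa using hlen
    have hb : dval t1 < 10 ^ t1.length := dval_lt_pow t1 (fun d hd => h1 d (by simp [hd]))
    have hab : a < b := hr
    have hstep : (a + 1) * 10 ^ t1.length ≤ b * 10 ^ t2.length := by
      rw [← hk]; exact Nat.mul_le_mul_right _ (by omega)
    nlinarith [Nat.zero_le (dval t2)]
  | @cons a t1 t2 h ih =>
    intro hlen h1 h2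
    rw [dval_cons, dval_cons]
    have hk : t1.length = t2.length := by simpa using hlen
    have := ih hk (fun d hd => h1 d (by simp [hd])) (fun d hd => h2 d (by simp [hd]))
    rw [hk]; omega

lemma lex_append {xs ys : List Nat} (as bs : List Nat) (hlen : xs.length = ys.length)
    (h : List.Lex (· < ·) xs ys) : List.Lex (· < ·) (xs ++ as) (ys ++ bs) := by
  induction h with
  | nil => simp at hlen
  | @rel a l1 b l2 hr => exact List.Lex.rel hr
  | @cons a l1 l2 h ih => exact List.Lex.cons (ih (by simpa using hlen))

-- ## halfN
lemma length_halfN (h b : Nat) : (halfN h b).length = h := by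
  induction h generalizing b with
  | zero => rfl
  | succ h ih => simp [halfN, ih]

lemma good_halfN (h b : Nat) : GoodL (halfN h b) := by
  induction h generalizing b with
  | zero => intro d hd; simp [halfN] at hd
  | succ h ih =>
    intro d hd
    simp only [halfN, List.mem_cons] at hd
    rcases hd with rfl | hd
    · have : b >>> h &&& 1 < 2 := by
        rw [Nat.and_one_is_mod]; exact Nat.mod_lt _ (by omega)
      omega
    · exact ih b d hd

lemma bit_eq (b h : Nat) : b >>> h &&& 1 = b / 2 ^ h % 2 := by
  rw [Nat.and_one_is_mod, Nat.shiftRight_eq_div_pow]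

lemma halfN_mod (h b : Nat) : halfN h b = halfN h (b % 2 ^ h) := by
  induction h generalizing b with
  | zero => rfl
  | succ h ih =>
    simp only [halfN, bit_eq, List.cons.injEq]
    refine ⟨?_, ?_⟩
    · rw [pow_succ, Nat.mod_mul_right_div_self]
      generalize b / 2 ^ h = x
      omega
    · rw [ih b, ih (b % 2 ^ (h+1)), Nat.mod_mod_of_dvd _ (pow_dvd_pow 2 (Nat.le_succ h))]

lemma halfN_lt_lex (h : Nat) : ∀ b1 b2, b1 < b2 → b2 < 2 ^ h →
    List.Lex (· < ·) (halfN h b1) (halfN h b2) := by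
  induction h with
  | zero => intro b1 b2 h1 h2; omega
  | succ h ih =>
    intro b1 b2 h1 h2
    have e1 : b1 >>> h &&& 1 = b1 / 2 ^ h := by
      rw [bit_eq, Nat.mod_eq_of_lt (Nat.div_lt_of_lt_mul (by rw [← pow_succ]; omega))]
    have e2 : b2 >>> h &&& 1 = b2 / 2 ^ h := by
      rw [bit_eq, Nat.mod_eq_of_lt (Nat.div_lt_of_lt_mul (by rw [← pow_succ]; omega))]
    have hle : b1 / 2 ^ h ≤ b2 / 2 ^ h := Nat.div_le_div_right (by omega)
    by_cases heq : b1 / 2 ^ h = b2 / 2 ^ h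
    · have hm1 := Nat.div_add_mod b1 (2 ^ h)
      have hm2 := Nat.div_add_mod b2 (2 ^ h)
      rw [heq] at hm1
      have hmlt : b1 % 2 ^ h < b2 % 2 ^ h := by omega
      simp only [halfN, e1, e2, heq]
      apply List.Lex.cons
      rw [halfN_mod h b1, halfN_mod h b2]
      exact ih _ _ hmlt (Nat.mod_lt _ (by positivity))
    · simp only [halfN, e1, e2]
      exact List.Lex.rel (by omega)

lemma halfN_surj (g : List Nat) (hg : GoodL g) :
    ∃ b, b < 2 ^ g.length ∧ halfN g.length b = g := by
  induction g with
  | nil => exact ⟨0, by simp [halfN]⟩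
  | cons c t ih =>
    obtain ⟨b', hb', he⟩ := ih (fun d hd => hg d (by simp [hd]))
    have hc : c = 3 ∨ c = 7 := hg c (by simp)
    have hone : (1:Nat) ≤ 2 ^ t.length := Nat.one_le_two_pow
    refine ⟨(if c = 7 then 1 else 0) * 2 ^ t.length + b', ?_, ?_⟩
    · rcases hc with rfl | rfl <;> simp only [List.length_cons, pow_succ] <;> simp <;> omega
    · simp only [halfN, List.length_cons, List.cons.injEq]
      refine ⟨?_, ?_⟩
      · rw [bit_eq]
        have hq : ((if c = 7 then 1 else 0) * 2 ^ t.length + b') / 2 ^ t.length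
            = (if c = 7 then 1 else 0) := by
          rcases hc with rfl | rfl
          · simpa using Nat.div_eq_of_lt hb'
          · norm_num
            exact hb'

        rw [hq]
        rcases hc with rfl | rfl <;> norm_num
      · rw [halfN_mod]
        have hm : ((if c = 7 then 1 else 0) * 2 ^ t.length + b') % 2 ^ t.length = b' := by
          rw [Nat.mul_comm, Nat.mul_add_mod, Nat.mod_eq_of_lt hb']
        rw [hm]
        exact he

lemma halfN_all1 (h : Nat) : halfN h (2 ^ h - 1) = List.replicate h 7 := by
  induction h with
  | zero => rfl
  | succ h ih =>
    simp only [halfN, List.replicate_succ, List.cons.injEq]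
    refine ⟨?_, ?_⟩
    · rw [bit_eq]
      have hone : (1:Nat) ≤ 2 ^ h := Nat.one_le_two_pow
      have h1 : (2 ^ (h+1) - 1) / 2 ^ h = 1 := by
        apply Nat.div_eq_of_lt_le <;> rw [pow_succ] at * <;> omega
      rw [h1]
    · rw [halfN_mod]
      have h2 : (1:Nat) ≤ 2 ^ h := Nat.one_le_two_pow
      have he : 2 ^ (h+1) - 1 = 2 ^ h + (2 ^ h - 1) := by rw [pow_succ]; omega
      rw [he, Nat.add_mod_left, Nat.mod_eq_of_lt (by omega), ih]

lemma halfN_zero (h : Nat) : halfN h 0 = List.replicate h 3 := by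
  induction h with
  | zero => rfl
  | succ h ih => simp [halfN, List.replicate_succ, ih, Nat.shiftRight_eq_div_pow]

-- ## palN structure
lemma length_palN (L b : Nat) : (palN L b).length = L := by
  simp only [palN, List.length_append, List.length_reverse, List.length_take, length_halfN]
  unfold hOf; omega

lemma good_palN (L b : Nat) : GoodL (palN L b) := by
  intro d hd
  rcases List.mem_append.mp hd with h | h
  · exact good_halfN _ b d h
  · exact good_halfN _ b d (List.mem_of_mem_take (List.mem_reverse.mp h))

lemma palN_digits_lt (L b : Nat) : ∀ d ∈ palN L b, d < 10 := by
  intro d hd; rcases good_palN L b d hd with rfl | rfl <;> omega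

lemma rev_palN (L b : Nat) : (palN L b).reverse = palN L b := by
  unfold palN
  have hlen : (halfN (hOf L) b).length = hOf L := length_halfN _ _
  by_cases hpar : L % 2 = 0
  · have h2 : (halfN (hOf L) b).take (L / 2) = halfN (hOf L) b := by
      rw [List.take_of_length_le (by rw [hlen]; unfold hOf; omega)]
    rw [h2, List.reverse_append, List.reverse_reverse]
  · obtain ⟨t, m, hfe⟩ : ∃ t m, halfN (hOf L) b = t ++ [m] := by
      rcases List.eq_nil_or_concat (halfN (hOf L) b) with h | ⟨t, m, h⟩
      · exfalso; rw [h] at hlen; unfold hOf at hlen; simp at hlen; omega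
      · exact ⟨t, m, by simpa using h⟩
    have hlt : t.length = L / 2 := by
      rw [hfe] at hlen; unfold hOf at hlen; simp at hlen; omega
    rw [hfe, List.take_append_of_le_length (by omega), List.take_of_length_le (by omega)]
    simp

-- any good palindrome is a palN of its half-code
lemma pal_decomp (u : List Nat) (hg : GoodL u) (hrev : u.reverse = u) (hne : u ≠ []) :
    ∃ b, b < 2 ^ hOf u.length ∧ palN u.length b = u := by
  set L := u.length with hL
  set g := u.take (hOf L) with hgdef
  have hglen : g.length = hOf L := by
    rw [hgdef, List.length_take, min_eq_left]; unfold hOf; omega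
  have hgood : GoodL g := fun d hd => hg d (List.mem_of_mem_take hd)
  obtain ⟨b, hb, he⟩ := halfN_surj g hgood
  rw [hglen] at hb he
  refine ⟨b, hb, ?_⟩
  unfold palN
  rw [he, hgdef]
  -- u = take h u ++ (take (L/2) (take h u)).reverse
  have htk : (u.take (hOf L)).take (L / 2) = u.take (L / 2) := by
    rw [List.take_take, min_eq_left]; unfold hOf; omega
  rw [htk]
  have hdrop : (u.take (L / 2)).reverse = u.drop (hOf L) := by
    have harg : u.length - L / 2 = hOf L := by unfold hOf; omega
    have h0 : u.take (L / 2) = (u.drop (hOf L)).reverse := by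
      conv_lhs => rw [← hrev]
      rw [List.take_reverse, harg]
    rw [h0, List.reverse_reverse]
  rw [hdrop, List.take_append_drop]

-- ## stN facts
lemma stN_inv (k : Nat) : 1 ≤ (stN k).1 ∧ (stN k).2 < 2 ^ hOf (stN k).1 := by
  induction k with
  | zero => exact ⟨le_refl _, by simp [stN, hOf]⟩
  | succ k ih =>
    have h : stN (k+1) = stepN (stN k) := rfl
    rw [h]; unfold stepN
    split
    · next hlt => exact ⟨ih.1, hlt⟩
    · exact ⟨by have := ih.1; omega, Nat.two_pow_pos _⟩

lemma stN_L_le (k : Nat) : (stN k).1 ≤ k + 1 := by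
  induction k with
  | zero => simp [stN]
  | succ k ih =>
    have h : stN (k+1) = stepN (stN k) := rfl
    rw [h]; unfold stepN
    split
    · show (stN k).1 ≤ k + 2; omega
    · show (stN k).1 + 1 ≤ k + 2; omega

lemma stN_L_mono (k : Nat) : (stN k).1 ≤ (stN (k+1)).1 := by
  have h : stN (k+1) = stepN (stN k) := rfl
  rw [h]; unfold stepN
  split
  · exact le_refl _
  · exact Nat.le_succ _

lemma stN_L_ge2 (k : Nat) (hk : 2 ≤ k) : 2 ≤ (stN k).1 := by
  induction k with
  | zero => omega
  | succ k ih =>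
    by_cases h2 : 2 ≤ k
    · exact le_trans (ih h2) (stN_L_mono k)
    · have hk1 : k = 1 := by omega
      subst hk1
      decide

-- ## comparing palindromes of one length
lemma lex_palN (L b1 b2 : Nat) (h : b1 < b2) (h2 : b2 < 2 ^ hOf L) :
    List.Lex (· < ·) (palN L b1) (palN L b2) := by
  unfold palN
  exact lex_append _ _ (by rw [length_halfN, length_halfN]) (halfN_lt_lex _ _ _ h h2)

lemma dval_palN_lt (L b1 b2 : Nat) (h : b1 < b2) (h2 : b2 < 2 ^ hOf L) :
    dval (palN L b1) < dval (palN L b2) :=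
  lexVal (lex_palN L b1 b2 h h2) (by rw [length_palN, length_palN])
    (palN_digits_lt _ _) (palN_digits_lt _ _)

lemma palN_rep7 (L : Nat) : palN L (2 ^ hOf L - 1) = List.replicate L 7 := by
  unfold palN
  rw [halfN_all1, List.take_replicate, List.reverse_replicate, ← List.replicate_add]
  congr 1
  rw [min_eq_left (by unfold hOf; omega)]
  unfold hOf; omega

lemma palN_rep3 (L : Nat) : palN L 0 = List.replicate L 3 := by
  unfold palN
  rw [halfN_zero, List.take_replicate, List.reverse_replicate, ← List.replicate_add]
  congr 1
  rw [min_eq_left (by unfold hOf; omega)]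
  unfold hOf; omega

lemma rep7_lt_rep3 (L : Nat) : dval (List.replicate L 7) < dval (List.replicate (L+1) 3) := by
  have hlt7 : dval (List.replicate L 7) < 10 ^ L := by
    have := dval_lt_pow (List.replicate L 7) (by intro d hd; simp at hd; omega)
    simpa using this
  have hge3 : 3 * 10 ^ L ≤ dval (List.replicate (L+1) 3) := by
    have := le_dval (List.replicate (L+1) 3) (by intro d hd; simp at hd; omega) (by simp)
    simpa using this
  omega

-- ## W facts
lemma W_lt_succ (k : Nat) : W k < W (k+1) := by
  have hinv := stN_inv k
  have hstep : stN (k+1) = stepN (stN k) := rfl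
  unfold W
  rw [hstep]
  unfold stepN
  split
  · next hlt => exact dval_palN_lt _ _ _ (by omega) hlt
  · next hge =>
    show dval (palN (stN k).1 (stN k).2) < dval (palN ((stN k).1 + 1) 0)
    have hbv : (stN k).2 = 2 ^ hOf (stN k).1 - 1 := by have := hinv.2; omega
    rw [hbv, palN_rep7, palN_rep3]
    exact rep7_lt_rep3 _

lemma W_mono : StrictMono W := strictMono_nat_of_lt_succ W_lt_succ

-- the key between lemma
lemma no_between (k : Nat) (u : List Nat) (hg : GoodL u) (hrev : u.reverse = u) (hne : u ≠ []) :
    dval u ≤ W k ∨ W (k+1) ≤ dval u := by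
  have hinv := stN_inv k
  have hstep : stN (k+1) = stepN (stN k) := rfl
  have glt10 : ∀ d ∈ u, d < 10 := fun d hd => by rcases hg d hd with rfl | rfl <;> omega
  have hpal_ne : palN (stN k).1 (stN k).2 ≠ [] := by
    intro hnil
    have := length_palN (stN k).1 (stN k).2
    rw [hnil] at this; simp at this; omega
  -- case: u shorter than L
  by_cases hsmall : u.length < (stN k).1
  · left
    have h1 : dval u < 10 ^ u.length := dval_lt_pow u glt10
    have h2 : 10 ^ u.length ≤ 10 ^ ((stN k).1 - 1) := Nat.pow_le_pow_right (by omega) (by omega)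
    have h3 : 3 * 10 ^ ((stN k).1 - 1) ≤ dval (palN (stN k).1 (stN k).2) := by
      have := le_dval _ (good_palN (stN k).1 (stN k).2) hpal_ne
      rwa [length_palN] at this
    unfold W
    omega
  -- case: u longer than L(k+1)
  by_cases hbig : (stN (k+1)).1 < u.length
  · right
    have hpal_ne' : palN (stN (k+1)).1 (stN (k+1)).2 ≠ [] := by
      intro hnil
      have := length_palN (stN (k+1)).1 (stN (k+1)).2
      rw [hnil] at this; simp at this
      have := (stN_inv (k+1)).1; omega
    have h1 : dval (palN (stN (k+1)).1 (stN (k+1)).2) < 10 ^ (stN (k+1)).1 := by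
      have := dval_lt_pow _ (palN_digits_lt (stN (k+1)).1 (stN (k+1)).2)
      rwa [length_palN] at this
    have h2 : 10 ^ (stN (k+1)).1 ≤ 10 ^ (u.length - 1) := Nat.pow_le_pow_right (by omega) (by omega)
    have h3 : 3 * 10 ^ (u.length - 1) ≤ dval u := le_dval u hg hne
    unfold W
    omega
  -- now L ≤ len u ≤ L'
  · rw [hstep] at hbig
    unfold stepN at hbig
    unfold W
    rw [hstep]
    unfold stepN
    split
    · next hlt =>
      -- L' = L: len u = L
      rw [if_pos hlt] at hbig
      simp at hbig
      have hlen : u.length = (stN k).1 := by omega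
      obtain ⟨c, hc, hcu⟩ := pal_decomp u hg hrev hne
      rw [hlen] at hc hcu
      show dval u ≤ dval (palN (stN k).1 (stN k).2) ∨ dval (palN (stN k).1 ((stN k).2 + 1)) ≤ dval u
      rcases Nat.lt_trichotomy c (stN k).2 with h | h | h
      · left
        rw [← hcu]
        exact le_of_lt (dval_palN_lt _ _ _ h (by omega))
      · left; rw [← hcu, h]
      · right
        rw [← hcu]
        rcases Nat.eq_or_lt_of_le h with h' | h'
        · rw [show (stN k).2 + 1 = c by omega]
        · exact le_of_lt (dval_palN_lt _ _ _ h' hc)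
    · next hge =>
      -- overflow: L' = L + 1
      rw [if_neg hge] at hbig
      simp at hbig
      show dval u ≤ dval (palN (stN k).1 (stN k).2) ∨ dval (palN ((stN k).1 + 1) 0) ≤ dval u
      have hbv : (stN k).2 = 2 ^ hOf (stN k).1 - 1 := by have := hinv.2; omega
      by_cases hlen : u.length = (stN k).1
      · left
        rw [hbv, palN_rep7, ← hlen]
        exact dval_le_rep7 u hg
      · right
        have hlen' : u.length = (stN k).1 + 1 := by omega
        rw [palN_rep3, ← hlen']
        exact rep3_le_dval u hg

-- ### bridge from port B to the abstract sequence
lemma hOf_cast (L : Nat) : PySem.Int.floordiv ((L : Int) + 1) 2 = (hOf L : Int) := by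
  have : ((L : Int) + 1) = ((L + 1 : Nat) : Int) := by push_cast; ring
  rw [this, show (2:Int) = ((2:Nat):Int) from rfl, PySem.Int.floordiv_natCast]
  rfl

lemma stepB_cast (L b : Nat) :
    stepB ((L : Int), (b : Int)) = (((stepN (L, b)).1 : Int), ((stepN (L, b)).2 : Int)) := by
  unfold stepB stepN
  simp only [hOf_cast, Int.toNat_natCast]
  rw [Int.shiftLeft_eq, one_mul]
  have hc : ((b : Int) + 1 < 2 ^ hOf L) ↔ (b + 1 < 2 ^ hOf L) := by
    constructor <;> intro h <;> exact_mod_cast h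
  by_cases h : b + 1 < 2 ^ hOf L
  · rw [if_pos (hc.mpr h), if_pos h]
    simp
  · rw [if_neg (fun hh => h (hc.mp hh)), if_neg h]
    simp


lemma iterB_succ' (k : Nat) (st : Int × Int) : iterB (k+1) st = stepB (iterB k st) := by
  induction k generalizing st with
  | zero => rfl
  | succ k ih => show iterB (k+1) (stepB st) = _; rw [ih (stepB st)]; rfl

lemma iterB_cast (k : Nat) : iterB k (1, 0) = (((stN k).1 : Int), ((stN k).2 : Int)) := by
  induction k with
  | zero => rfl
  | succ k ih =>
    rw [iterB_succ', ih]
    have : stN (k+1) = stepN (stN k) := rfl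
    rw [this, ← stepB_cast]

lemma halfmap (h b : Nat) :
    (List.range h).map (fun i : Nat => (3 : Int) + 4 * PySem.Int.band ((b:Int) >>> ((h:Int) - 1 - (i:Int)).toNat) 1)
      = (halfN h b).map (fun d : Nat => (d : Int)) := by
  induction h with
  | zero => rfl
  | succ h ih =>
    rw [List.range_succ_eq_map, List.map_cons, List.map_map]
    simp only [halfN, List.map_cons]
    congr 1
    · push_cast
      rw [show ((h:Int) + 1 - 1 - 0).toNat = h by omega]
      rw [show ((b:Int) >>> h) = ((b >>> h : Nat) : Int) by simp [Int.shiftRight_eq, Int.natCast_shiftRight]]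
      rw [show ((1:Int)) = ((1:Nat):Int) from rfl, PySem.Int.band_natCast]
    · rw [← ih]
      apply List.map_congr_left
      intro i hi
      have harg : (((h+1 : Nat):Int) - 1 - ((Nat.succ i : Nat):Int)).toNat
          = (((h:Nat):Int) - 1 - ((i:Nat):Int)).toNat := by push_cast; omega
      simp only [Function.comp_apply, harg]

lemma foldl_cast (ds : List Nat) : ∀ a : Nat,
    (ds.map (fun d : Nat => (d : Int))).foldl (fun num d => 10 * num + d) (a : Int)
      = ((ds.foldl (fun num d => 10 * num + d) a : Nat) : Int) := by
  induction ds with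
  | nil => intro a; simp
  | cons d t ih =>
    intro a
    simp only [List.map_cons, List.foldl_cons]
    rw [show (10 * (a:Int) + (d:Int)) = ((10 * a + d : Nat) : Int) by push_cast; ring, ih]

lemma altB_eq (n : Int) : nth_palindrome_alt n = (W ((n-1).toNat) : Int) := by
  unfold nth_palindrome_alt
  rw [iterB_cast]
  simp only
  set k := (n-1).toNat
  set L := (stN k).1 with hL
  set b := (stN k).2 with hb
  rw [hOf_cast]
  -- half list
  have hrange : PySem.List.pyRange 0 (hOf L : Int) 1
      = (List.range (hOf L)).map (fun i : Nat => ((0:Int) + (i:Int))) := by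
    rw [PySem.List.pyRange_one]
    norm_num
  rw [hrange, List.map_map]
  have hmap : (List.range (hOf L)).map
      ((fun i => 3 + 4 * PySem.Int.band ((b:Int) >>> (((hOf L : Nat):Int) - 1 - i).toNat) 1)
        ∘ (fun i : Nat => (0:Int) + (i:Int)))
      = (halfN (hOf L) b).map (fun d : Nat => (d : Int)) := by
    rw [← halfmap (hOf L) b]
    apply List.map_congr_left
    intro i hi
    simp only [Function.comp_apply, zero_add]
  rw [hmap]
  -- slice
  have hfd : PySem.Int.floordiv (L : Int) 2 = ((L / 2 : Nat) : Int) := by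
    rw [show (2:Int) = ((2:Nat):Int) from rfl, PySem.Int.floordiv_natCast]
  rw [hfd, PySem.List.slice_to_natCast, PySem.List.slice?_none_none_neg_one]
  simp only [Option.getD_some]
  rw [← List.map_take, ← List.map_reverse, ← List.map_append,
    show (0:Int) = ((0:Nat):Int) from rfl, foldl_cast]
  rfl

-- ### port A: the loop finds the same sequence
lemma W_zero : W 0 = 3 := by decide
lemma W_one : W 1 = 7 := by decide
lemma W_two : W 2 = 33 := by decide

lemma W_ge3 (k : Nat) : 3 ≤ W k := by
  have := W_mono.monotone (Nat.zero_le k)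
  rw [W_zero] at this; omega

lemma W_mod4 (k : Nat) (hk : 2 ≤ k) : W k % 4 = 1 := by
  apply dval_mod4 _ (good_palN _ _)
  rw [length_palN]
  exact stN_L_ge2 k hk

lemma W_lt_pow (k : Nat) : W k < 10 ^ (k + 1) := by
  have h1 : W k < 10 ^ (stN k).1 := by
    have := dval_lt_pow _ (fun d hd => by rcases good_palN (stN k).1 (stN k).2 d hd with rfl | rfl <;> omega)
    rwa [length_palN] at this
  exact lt_of_lt_of_le h1 (Nat.pow_le_pow_right (by omega) (stN_L_le k))

-- test value at a palindrome
lemma testA_iff' (m : Int) (hm : 0 < m) :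
    (is_palindrome m && (PySem.Int.toChars m).all (fun d => PySem.Chars.isIn [d] ['3','7'])) = true
    ↔ (GoodL (nrepr m.toNat) ∧ (nrepr m.toNat).reverse = nrepr m.toNat) := by
  unfold is_palindrome
  exact testA_iff m hm

lemma palN_st_ne_nil (c : Nat) : palN (stN c).1 (stN c).2 ≠ [] := by
  intro hnil
  have hlp := length_palN (stN c).1 (stN c).2
  rw [hnil] at hlp
  simp at hlp
  have := (stN_inv c).1
  omega

lemma test_at_W (c : Nat) :
    (is_palindrome ((W c : Nat) : Int) &&
      (PySem.Int.toChars ((W c : Nat) : Int)).all (fun d => PySem.Chars.isIn [d] ['3','7'])) = true := by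
  rw [testA_iff' _ (by have := W_ge3 c; omega)]
  rw [Int.toNat_natCast]
  unfold W
  rw [nrepr_dval _ (good_palN _ _) (palN_st_ne_nil c)]
  exact ⟨good_palN _ _, rev_palN _ _⟩

lemma loopA_eq (n : Int) (hn : 3 ≤ n) :
    ∀ (fuel : Nat) (c : Nat) (num : Int), 2 ≤ c → (c : Int) < n →
    ((W (c-1) : Nat) : Int) < num → num ≤ ((W c : Nat) : Int) → num % 4 = 1 →
    ((W (n.toNat - 1) : Nat) : Int) < num + 4 * (fuel : Int) →
    nthLoop n fuel (c : Int) num = ((W (n.toNat - 1) : Nat) : Int) := by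
  intro fuel
  induction fuel with
  | zero =>
    intro c num hc hcn h1 h2 hmod hfuel
    exfalso
    have hcle : c ≤ n.toNat - 1 := by omega
    have := W_mono.monotone hcle
    have hcast : ((W c : Nat) : Int) ≤ ((W (n.toNat - 1) : Nat) : Int) := by exact_mod_cast this
    omega
  | succ fuel ih =>
    intro c num hc hcn h1 h2 hmod hfuel
    show (if _ then _ else _) = _
    by_cases heq : num = ((W c : Nat) : Int)
    · -- at the palindrome
      subst heq
      rw [if_pos (test_at_W c)]
      by_cases hend : (c : Int) + 1 = n
      · rw [if_pos hend]
        rw [show n.toNat - 1 = c by omega]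
      · rw [if_neg hend]
        have hc1 : ((c : Nat) + 1 : Int) = ((c:Int) + 1) := by push_cast; ring
        rw [show (c : Int) + 1 = ((c + 1 : Nat) : Int) by push_cast; ring]
        apply ih (c+1) _ (by omega) (by push_cast; omega) _ _ _ _
        · rw [show c + 1 - 1 = c from rfl]
          omega
        · have hlt : W c < W (c+1) := W_mono (by omega)
          have hm1 : W (c+1) % 4 = 1 := W_mod4 (c+1) (by omega)
          have hm2 : W c % 4 = 1 := W_mod4 c (by omega)
          push_cast
          omega
        · omega
        · push_cast at hfuel ⊢
          omega
    · -- strictly below the next palindrome: the test must fail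
      have hlt : num < ((W c : Nat) : Int) := by omega
      have hpos : 0 < num := by have := W_ge3 (c-1); omega
      have htest : (is_palindrome num &&
          (PySem.Int.toChars num).all (fun d => PySem.Chars.isIn [d] ['3','7'])) = false := by
        by_contra hne
        rw [Bool.not_eq_false] at hne
        obtain ⟨hgood, hrevu⟩ := (testA_iff' num hpos).mp hne
        have hdv : dval (nrepr num.toNat) = num.toNat := dval_nrepr num.toNat
        have hnb := no_between (c-1) (nrepr num.toNat) hgood hrevu (nrepr_ne_nil _)
        rw [show c - 1 + 1 = c by omega] at hnb
        rw [hdv] at hnb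
        rcases hnb with hle | hge <;> omega
      rw [if_neg (by rw [htest]; simp)]
      have hm2 : W c % 4 = 1 := W_mod4 c (by omega)
      apply ih c (num + 4) hc hcn (by omega) (by omega) (by omega)
        (by push_cast at hfuel ⊢; omega)

lemma main_eq (n : Int) (hpre : 1 ≤ n) : nth_palindrome n = nth_palindrome_alt n := by
  rw [altB_eq]
  unfold nth_palindrome
  by_cases h1 : n = 1
  · subst h1
    rw [if_pos rfl, show ((1:Int)-1).toNat = 0 from rfl, W_zero]
    rfl
  by_cases h2 : n = 2
  · subst h2
    rw [if_neg h1, if_pos rfl, show ((2:Int)-1).toNat = 1 from rfl, W_one]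
    rfl
  · rw [if_neg h1, if_neg h2]
    have hn3 : 3 ≤ n := by omega
    have hidx : (n - 1).toNat = n.toNat - 1 := by omega
    rw [hidx]
    have h33 : ((W 1 : Nat) : Int) < 33 := by rw [W_one]; norm_num
    have hW2 : (33 : Int) ≤ ((W 2 : Nat) : Int) := by rw [W_two]; norm_num
    have hfuel : ((W (n.toNat - 1) : Nat) : Int) < 33 + 4 * ((10 ^ n.toNat : Nat) : Int) := by
      have hp := W_lt_pow (n.toNat - 1)
      rw [show n.toNat - 1 + 1 = n.toNat by omega] at hp
      have : ((W (n.toNat - 1) : Nat) : Int) < ((10 ^ n.toNat : Nat) : Int) := by exact_mod_cast hp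
      omega
    have := loopA_eq n hn3 (10 ^ n.toNat) 2 33 (le_refl 2) (by push_cast; omega)
      (by rw [show (2:Nat) - 1 = 1 from rfl]; exact h33) hW2 (by decide) hfuel
    simpa using this

-- ===== VERDICT (by name: the statement is the Claim_ definition above) =====
theorem nth_palindrome_spec : Claim_equal_nth_palindrome := by
  intro n _ hpre
  unfold Spec_nth_palindrome
  exact main_eq n hpre
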